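-- pv_equiv track=rewrite | github.com/PKliska/kowalski-analysis | backend/main.py | get_kth_element
-- ===== SOURCE A (Python) =====
-- def get_kth_element(possible_values, k):
--     if len(possible_values) == 1:
--         return [possible_values[0][k]]
--     step = 1
--     for i in possible_values[1:]:
--         step *= len(i)
--     n = k // step
--     return [possible_values[0][n]] + get_kth_element(possible_values[1:], k % step)
-- ===== SOURCE B (Python) =====
-- def get_kth_element(possible_values, k):
--     # suffix products of lengths computed once, then one divmod pass
--     steps = []
--     s = 1
--     for vals in reversed(possible_values):
--         steps.append(s)
--         s *= len(vals)
--     steps.reverse()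
--     out = []
--     for vals, step in zip(possible_values, steps):
--         n, k = divmod(k, step)
--         out.append(vals[n])
--     return out
-- ===== Notes on version B (the rewrite author's own statement) =====
-- stated objective: faster
-- what changed: replaces the recursion that re-multiplies all remaining lengths (and re-slices the list) at every level by one right-to-left pass precomputing suffix products followed by one left-to-right divmod pass
import Mathlib
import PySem

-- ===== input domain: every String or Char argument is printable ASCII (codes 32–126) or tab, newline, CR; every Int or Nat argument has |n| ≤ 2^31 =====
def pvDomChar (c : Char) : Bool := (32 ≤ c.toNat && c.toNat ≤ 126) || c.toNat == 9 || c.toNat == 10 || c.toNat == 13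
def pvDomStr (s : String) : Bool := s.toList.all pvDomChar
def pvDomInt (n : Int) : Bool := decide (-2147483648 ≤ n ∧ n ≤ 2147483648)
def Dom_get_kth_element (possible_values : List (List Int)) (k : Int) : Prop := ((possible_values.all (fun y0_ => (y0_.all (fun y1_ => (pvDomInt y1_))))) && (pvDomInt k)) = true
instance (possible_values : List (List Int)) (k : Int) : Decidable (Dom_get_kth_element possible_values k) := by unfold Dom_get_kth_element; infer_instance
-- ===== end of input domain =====

-- B replaces A's recursion (which re-multiplies all remaining lengths at every level) by a
-- single suffix-product pass plus one divmod pass; objective: faster (asymptotic, O(n^2) -> O(n)).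


-- ===== PORT A =====
-- literal port of A; where the Python raises (empty list, index out of range,
-- division by zero) the pyGet?/floordiv primitive's default is used — those inputs are outside Pre_
def get_kth_element : List (List Int) → Int → List Int
  | [], _ => []              -- Python: possible_values[0] raises IndexError here (outside Pre_)
  | [x], k => [(PySem.List.pyGet? x k).getD 0]
  | x :: y :: rs, k =>
      let step := (y :: rs).foldl (fun s l => s * (l.length : Int)) 1
      let n := PySem.Int.floordiv k step
      [(PySem.List.pyGet? x n).getD 0] ++ get_kth_element (y :: rs) (PySem.Int.mod k step)

-- ===== PORT B =====
-- Source B's first loop: append suffix products over reversed(pv) then reverse = cons-accumulate over pv.reverse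
def altSteps (pv : List (List Int)) : List Int :=
  (pv.reverse.foldl (fun (p : List Int × Int) vals => (p.2 :: p.1, p.2 * (vals.length : Int))) ([], 1)).1

def get_kth_element_alt (possible_values : List (List Int)) (k : Int) : List Int :=
  ((possible_values.zip (altSteps possible_values)).foldl
    (fun (st : List Int × Int) p =>
      let n := PySem.Int.floordiv st.2 p.2
      let k' := PySem.Int.mod st.2 p.2
      (st.1 ++ [(PySem.List.pyGet? p.1 n).getD 0], k'))
    ([], k)).1

-- ===== PRECONDITION & SPEC =====
-- exactly the inputs on which Python A returns normally: a nonempty list of nonempty lists and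
-- k within Python's (negative-index-allowing) range for the mixed radix, i.e. -P ≤ k < P
def Pre_get_kth_element (possible_values : List (List Int)) (k : Int) : Prop :=
  possible_values ≠ [] ∧ (∀ l ∈ possible_values, l ≠ []) ∧
  -(possible_values.map (fun l => (l.length : Int))).prod ≤ k ∧
  k < (possible_values.map (fun l => (l.length : Int))).prod
instance (possible_values : List (List Int)) (k : Int) : Decidable (Pre_get_kth_element possible_values k) := by unfold Pre_get_kth_element; infer_instance
def pvWitness_get_kth_element : List (List Int) × Int := ([[1, 2], [3, 4, 5]], 4)
def Spec_get_kth_element (possible_values : List (List Int)) (k : Int) (out : List Int) : Prop := out = get_kth_element_alt possible_values k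
instance (possible_values : List (List Int)) (k : Int) (out : List Int) : Decidable (Spec_get_kth_element possible_values k out) := by unfold Spec_get_kth_element; infer_instance

-- ===== CLAIM (what is proved, stated in full; the proofs are below) =====
def Claim_equal_get_kth_element : Prop := ∀ (possible_values : List (List Int)) (k : Int), Dom_get_kth_element possible_values k → Pre_get_kth_element possible_values k → Spec_get_kth_element possible_values k (get_kth_element possible_values k)

-- ===== LEMMAS AND PROOFS =====

-- the accumulated product in altSteps equals A's step (product of the lengths), by commutativity
lemma foldl_mul_len (l : List (List Int)) (init : Int) :
    l.foldl (fun s x => s * (x.length : Int)) init = init * (l.map (fun x => (x.length : Int))).prod := by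
  induction l generalizing init with
  | nil => simp
  | cons a t ih => simp [List.foldl, ih, mul_assoc]

lemma foldr_snd (l : List (List Int)) :
    (List.foldr (fun (x : List Int) (y : List Int × Int) => (y.2 :: y.1, y.2 * (x.length : Int))) ([], 1) l).2
      = (l.map (fun x => (x.length : Int))).prod := by
  induction l with
  | nil => simp
  | cons a t ih => simp [ih, mul_comm]

lemma altSteps_cons (x : List Int) (rest : List (List Int)) :
    altSteps (x :: rest) = (rest.map (fun l => (l.length : Int))).prod :: altSteps rest := by
  unfold altSteps
  simp [List.foldl_append, foldr_snd]

-- the output accumulator of B's second loop is a plain prefix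
lemma fold_acc (ps : List (List Int × Int)) (acc : List Int) (k : Int) :
    (ps.foldl (fun (st : List Int × Int) p =>
        (st.1 ++ [(PySem.List.pyGet? p.1 (PySem.Int.floordiv st.2 p.2)).getD 0],
         PySem.Int.mod st.2 p.2)) (acc, k)).1
    = acc ++ (ps.foldl (fun (st : List Int × Int) p =>
        (st.1 ++ [(PySem.List.pyGet? p.1 (PySem.Int.floordiv st.2 p.2)).getD 0],
         PySem.Int.mod st.2 p.2)) ([], k)).1 := by
  induction ps generalizing acc k with
  | nil => simp
  | cons p t ih =>
    simp only [List.foldl_cons, List.nil_append]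
    rw [ih, ih [(PySem.List.pyGet? p.1 (PySem.Int.floordiv k p.2)).getD 0]]
    simp

lemma alt_cons (x : List Int) (rest : List (List Int)) (k : Int) :
    get_kth_element_alt (x :: rest) k =
      (PySem.List.pyGet? x (PySem.Int.floordiv k ((rest.map (fun l => (l.length : Int))).prod))).getD 0
        :: get_kth_element_alt rest (PySem.Int.mod k ((rest.map (fun l => (l.length : Int))).prod)) := by
  unfold get_kth_element_alt
  rw [altSteps_cons]
  simp only [List.zip_cons_cons, List.foldl_cons]
  rw [fold_acc]
  simp

-- A = B unconditionally (the ports use the same total primitives outside Pre_ as well)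
lemma ab_eq (pv : List (List Int)) (k : Int) :
    get_kth_element pv k = get_kth_element_alt pv k := by
  induction pv generalizing k with
  | nil => rfl
  | cons x rest ih =>
    cases rest with
    | nil =>
      show get_kth_element [x] k = _
      rw [alt_cons]
      simp [get_kth_element, get_kth_element_alt, altSteps]
    | cons y rs =>
      rw [alt_cons, get_kth_element, ih]
      simp [foldl_mul_len]

-- ===== VERDICT (by name: the statement is the Claim_ definition above) =====
theorem get_kth_element_spec : Claim_equal_get_kth_element := by
  intro pv k _ _
  exact ab_eq pv k
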